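-- pv_equiv track=rewrite | github.com/ronpik/zero-shot-stance | src/eval_model.py | analyze_predictions
-- ===== SOURCE A (Python) =====
-- from typing import List, Tuple, Iterable, Sequence, Dict, Callable, Union
--
-- PredictionsPerTopic = Dict[str, Tuple[Sequence[int], Sequence[int]]]
--
-- def analyze_predictions(
--         topics: Sequence[str], y_true: Sequence[int], y_pred: Sequence[int]
-- ) -> PredictionsPerTopic:
--
--     predictions_per_topic = {}
--     for topic, label, pred in zip(topics, y_true, y_pred):
--         preds, labels = predictions_per_topic.setdefault(topic, ([], []))
--         preds.append(pred)
--         labels.append(label)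
--
--     return predictions_per_topic
-- ===== SOURCE B (Python) =====
-- def analyze_predictions(topics, y_true, y_pred):
--     triples = list(zip(topics, y_true, y_pred))
--     order = list(dict.fromkeys(t for t, _, _ in triples))
--     return {t: ([p for tt, _, p in triples if tt == t],
--                 [l for tt, l, _ in triples if tt == t])
--             for t in order}
-- ===== Notes on version B (the rewrite author's own statement) =====
-- stated objective: alternative
-- what changed: Replaces the online dict setdefault-and-append single pass with a two-phase strategy: first dedup the topics in first-occurrence order, then build each topic's (preds, labels) pair by per-topic filtering passes over the zipped triples.
import Mathlib
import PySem

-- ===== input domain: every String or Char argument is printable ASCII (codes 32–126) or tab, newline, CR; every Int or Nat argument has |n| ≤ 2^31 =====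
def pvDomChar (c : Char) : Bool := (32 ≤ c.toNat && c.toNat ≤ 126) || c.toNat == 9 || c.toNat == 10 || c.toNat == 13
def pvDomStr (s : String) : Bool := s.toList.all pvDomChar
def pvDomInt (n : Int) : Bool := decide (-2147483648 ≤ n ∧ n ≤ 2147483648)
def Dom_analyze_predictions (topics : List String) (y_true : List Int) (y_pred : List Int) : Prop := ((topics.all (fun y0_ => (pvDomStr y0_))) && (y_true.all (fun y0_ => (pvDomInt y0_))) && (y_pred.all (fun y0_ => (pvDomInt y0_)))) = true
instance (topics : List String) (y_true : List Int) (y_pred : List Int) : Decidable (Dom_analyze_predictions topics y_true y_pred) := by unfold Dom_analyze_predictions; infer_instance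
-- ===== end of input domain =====

-- ===== PORT A =====
-- B replaces A's online setdefault-and-append dict pass by dedup of topics then per-topic filter passes (alternative decomposition, same return value).
def analyze_predictions (topics : List String) (y_true : List Int) (y_pred : List Int) : List (String × List Int × List Int) :=
  -- for topic, label, pred in zip(...): preds, labels = d.setdefault(topic, ([],[])); preds.append(pred); labels.append(label)
  ((topics.zip (y_true.zip y_pred)).foldl
    (fun d x => d.modify x.1 ([], []) (fun pl => (pl.1 ++ [x.2.2], pl.2 ++ [x.2.1])))
    PySem.Dict.empty).items

-- ===== PORT B =====
def analyze_predictions_alt (topics : List String) (y_true : List Int) (y_pred : List Int) : List (String × List Int × List Int) :=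
  let triples := topics.zip (y_true.zip y_pred)
  let order := PySem.List.dedup (triples.map (·.1))
  order.map (fun t =>
    (t, ((triples.filter (·.1 == t)).map (·.2.2),
         (triples.filter (·.1 == t)).map (·.2.1))))

-- ===== PRECONDITION & SPEC =====
def Spec_analyze_predictions (topics : List String) (y_true : List Int) (y_pred : List Int) (out : List (String × List Int × List Int)) : Prop := out = analyze_predictions_alt topics y_true y_pred
instance (topics : List String) (y_true : List Int) (y_pred : List Int) (out : List (String × List Int × List Int)) : Decidable (Spec_analyze_predictions topics y_true y_pred out) := by unfold Spec_analyze_predictions; infer_instance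

-- ===== CLAIM (what is proved, stated in full; the proofs are below) =====
def Claim_equal_analyze_predictions : Prop := ∀ (topics : List String) (y_true : List Int) (y_pred : List Int), Dom_analyze_predictions topics y_true y_pred → Spec_analyze_predictions topics y_true y_pred (analyze_predictions topics y_true y_pred)

-- ===== LEMMAS AND PROOFS =====

lemma getD_group_loop (l : List (String × Int × Int)) (d : PySem.Dict String (List Int × List Int)) (c : String) :
    (l.foldl (fun d x => d.modify x.1 ([], []) (fun pl => (pl.1 ++ [x.2.2], pl.2 ++ [x.2.1]))) d).getD c ([], [])
      = ((d.getD c ([], [])).1 ++ (l.filter (·.1 == c)).map (·.2.2),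
         (d.getD c ([], [])).2 ++ (l.filter (·.1 == c)).map (·.2.1)) := by
  induction l generalizing d with
  | nil => simp
  | cons x l ih =>
    simp only [List.foldl_cons, List.filter_cons]
    by_cases h : x.1 = c
    · subst h
      simp [ih, PySem.Dict.getD_modify_self]
    · have h' : ¬c = x.1 := fun he => h he.symm
      simp [ih, PySem.Dict.getD_modify, h, h']

-- ===== VERDICT (by name: the statement is the Claim_ definition above) =====
theorem analyze_predictions_spec : Claim_equal_analyze_predictions := by
  intro topics y_true y_pred _
  unfold Spec_analyze_predictions analyze_predictions analyze_predictions_alt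
  set l := topics.zip (y_true.zip y_pred) with hl
  set d := l.foldl (fun d x => d.modify x.1 ([], []) (fun pl => (pl.1 ++ [x.2.2], pl.2 ++ [x.2.1]))) PySem.Dict.empty with hd
  have hkeys : d.keys = PySem.Set.ofList (l.map (·.1)) := by
    simpa using PySem.Dict.keys_foldl_modify_key l (·.1) ([], [])
      (fun _ x pl => (pl.1 ++ [x.2.2], pl.2 ++ [x.2.1])) PySem.Dict.empty
  have hnd : d.keys.Nodup := by
    exact PySem.Dict.nodup_keys_foldl_modify_key l (·.1) ([], [])
      (fun _ x pl => (pl.1 ++ [x.2.2], pl.2 ++ [x.2.1])) PySem.Dict.empty PySem.Dict.nodup_keys_empty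
  rw [PySem.Dict.items_eq_map_keys d hnd ([], []), hkeys]
  simp only [PySem.List.dedup_eq_ofList]
  refine List.map_congr_left ?_
  intro t _
  rw [hd, getD_group_loop]
  simp
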